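-- pv_equiv track=rewrite | github.com/johnlicataptbiz/DailyAccomplishments | analyze_branches.py | categorize_branches
-- ===== SOURCE A (Python) =====
-- from typing import List, Dict, Tuple
--
-- def categorize_branches(branches: List[str]) -> Dict[str, List[str]]:
--     """Categorize branches by prefix."""
--     categories = {
--         'codex': [],
--         'copilot': [],
--         'feature': [],
--         'archive': [],
--         'codespace': [],
--         'integrate': [],
--         'rebuild': [],
--         'salvage': [],
--         'special': [],  # main, gh-pages, etc.
--         'other': []
--     }
--
--     for branch in branches:
--         if branch in ['main', 'gh-pages', 'reports-gh-pages']: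
--             categories['special'].append(branch)
--         elif branch.startswith('codex/'):
--             categories['codex'].append(branch)
--         elif branch.startswith('copilot/'):
--             categories['copilot'].append(branch)
--         elif branch.startswith('feature/'):
--             categories['feature'].append(branch)
--         elif branch.startswith('archive/'):
--             categories['archive'].append(branch)
--         elif branch.startswith('codespace'):
--             categories['codespace'].append(branch)
--         elif branch.startswith('integrate/'):
--             categories['integrate'].append(branch)
--         elif branch.startswith('rebuild/'):
--             categories['rebuild'].append(branch)
--         elif branch.startswith('salvage/'):
--             categories['salvage'].append(branch)
--         else:
--             categories['other'].append(branch)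
--
--     return categories
-- ===== SOURCE B (Python) =====
-- SPECIAL = ('main', 'gh-pages', 'reports-gh-pages')
--
-- PREFIXES = {
--     'codex': 'codex/',
--     'copilot': 'copilot/',
--     'feature': 'feature/',
--     'archive': 'archive/',
--     'codespace': 'codespace',
--     'integrate': 'integrate/',
--     'rebuild': 'rebuild/',
--     'salvage': 'salvage/',
-- }
--
-- # The prefix rules are mutually exclusive (none of the prefix strings is a prefix
-- # of another, and the SPECIAL names are screened out first), so one independent
-- # filtering pass per category reproduces A's first-match dispatch exactly.
--
-- def categorize_branches(branches):
--     result = {cat: [b for b in branches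
--                     if b not in SPECIAL and b.startswith(pre)]
--               for cat, pre in PREFIXES.items()}
--     result['special'] = [b for b in branches if b in SPECIAL]
--     result['other'] = [b for b in branches
--                        if b not in SPECIAL
--                        and not any(b.startswith(p) for p in PREFIXES.values())]
--     return result
-- ===== Notes on version B (the rewrite author's own statement) =====
-- stated objective: alternative
-- what changed: Replaced A's single pass with a ten-way first-match if/elif dispatch by one independent filtering pass per category (a dict comprehension of per-category filters plus separate special/other filters), correct because the prefix rules are mutually exclusive.
import Mathlib
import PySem

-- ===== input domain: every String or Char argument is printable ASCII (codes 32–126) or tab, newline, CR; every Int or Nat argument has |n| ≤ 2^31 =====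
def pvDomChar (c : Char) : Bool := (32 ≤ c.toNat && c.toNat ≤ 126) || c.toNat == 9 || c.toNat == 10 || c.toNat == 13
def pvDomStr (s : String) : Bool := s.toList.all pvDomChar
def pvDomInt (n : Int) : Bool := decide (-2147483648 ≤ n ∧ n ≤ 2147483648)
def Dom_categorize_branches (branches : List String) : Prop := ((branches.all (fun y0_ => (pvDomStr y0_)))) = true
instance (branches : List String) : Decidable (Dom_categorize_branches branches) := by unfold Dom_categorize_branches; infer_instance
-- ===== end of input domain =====

-- B replaces A's single-pass ten-way if/elif dispatch by one independent filtering pass per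
-- category (valid because the prefix rules are mutually exclusive); objective: alternative.

-- ===== PORT A =====
def categorize_branches (branches : List String) : List (String × List String) :=
  let categories : PySem.Dict String (List String) := PySem.Dict.ofList
    [("codex", []), ("copilot", []), ("feature", []), ("archive", []), ("codespace", []),
     ("integrate", []), ("rebuild", []), ("salvage", []), ("special", []), ("other", [])]
  let categories := branches.foldl (fun cats branch =>
    if branch ∈ (["main", "gh-pages", "reports-gh-pages"] : List String) then
      cats.modify "special" [] (· ++ [branch])
    else if PySem.Str.startswith branch "codex/" then
      cats.modify "codex" [] (· ++ [branch])
    else if PySem.Str.startswith branch "copilot/" then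
      cats.modify "copilot" [] (· ++ [branch])
    else if PySem.Str.startswith branch "feature/" then
      cats.modify "feature" [] (· ++ [branch])
    else if PySem.Str.startswith branch "archive/" then
      cats.modify "archive" [] (· ++ [branch])
    else if PySem.Str.startswith branch "codespace" then
      cats.modify "codespace" [] (· ++ [branch])
    else if PySem.Str.startswith branch "integrate/" then
      cats.modify "integrate" [] (· ++ [branch])
    else if PySem.Str.startswith branch "rebuild/" then
      cats.modify "rebuild" [] (· ++ [branch])
    else if PySem.Str.startswith branch "salvage/" then
      cats.modify "salvage" [] (· ++ [branch])
    else
      cats.modify "other" [] (· ++ [branch])) categories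
  categories.items

-- ===== PORT B =====
-- SPECIAL
def pvSpecial : List String := ["main", "gh-pages", "reports-gh-pages"]

-- PREFIXES (a dict of category -> prefix; ported as its items list)
def pvPrefixes : List (String × String) :=
  [("codex", "codex/"), ("copilot", "copilot/"), ("feature", "feature/"),
   ("archive", "archive/"), ("codespace", "codespace"), ("integrate", "integrate/"),
   ("rebuild", "rebuild/"), ("salvage", "salvage/")]

-- one independent filter pass per category; special and other get their own passes
def categorize_branches_alt (branches : List String) : List (String × List String) :=
  (pvPrefixes.map (fun cp =>
      (cp.1, branches.filter (fun b => !(pvSpecial.contains b) && PySem.Str.startswith b cp.2))))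
  ++ [("special", branches.filter (fun b => pvSpecial.contains b)),
      ("other", branches.filter (fun b =>
        !(pvSpecial.contains b) && !(pvPrefixes.any (fun p => PySem.Str.startswith b p.2))))]

-- ===== PRECONDITION & SPEC =====
def Spec_categorize_branches (branches : List String) (out : List (String × List String)) : Prop := out = categorize_branches_alt branches
instance (branches : List String) (out : List (String × List String)) : Decidable (Spec_categorize_branches branches out) := by unfold Spec_categorize_branches; infer_instance

-- ===== CLAIM (what is proved, stated in full; the proofs are below) =====
def Claim_equal_categorize_branches : Prop := ∀ (branches : List String), Dom_categorize_branches branches → Spec_categorize_branches branches (categorize_branches branches)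

-- ===== LEMMAS AND PROOFS =====

-- A's initial dict (proof helper naming the literal inside categorize_branches)
def pvInit : PySem.Dict String (List String) := PySem.Dict.ofList
    [("codex", []), ("copilot", []), ("feature", []), ("archive", []), ("codespace", []),
     ("integrate", []), ("rebuild", []), ("salvage", []), ("special", []), ("other", [])]

-- the category A's if/elif chain assigns to a branch (proof helper)
def pvCatOf (b : String) : String :=
  if b ∈ (["main", "gh-pages", "reports-gh-pages"] : List String) then "special"
  else if PySem.Str.startswith b "codex/" then "codex"
  else if PySem.Str.startswith b "copilot/" then "copilot"
  else if PySem.Str.startswith b "feature/" then "feature"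
  else if PySem.Str.startswith b "archive/" then "archive"
  else if PySem.Str.startswith b "codespace" then "codespace"
  else if PySem.Str.startswith b "integrate/" then "integrate"
  else if PySem.Str.startswith b "rebuild/" then "rebuild"
  else if PySem.Str.startswith b "salvage/" then "salvage"
  else "other"

-- A's chain body is exactly "modify the category pvCatOf names"
theorem pv_step_eq (cats : PySem.Dict String (List String)) (branch : String) :
    (if branch ∈ (["main", "gh-pages", "reports-gh-pages"] : List String) then
      cats.modify "special" [] (· ++ [branch])
    else if PySem.Str.startswith branch "codex/" then
      cats.modify "codex" [] (· ++ [branch])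
    else if PySem.Str.startswith branch "copilot/" then
      cats.modify "copilot" [] (· ++ [branch])
    else if PySem.Str.startswith branch "feature/" then
      cats.modify "feature" [] (· ++ [branch])
    else if PySem.Str.startswith branch "archive/" then
      cats.modify "archive" [] (· ++ [branch])
    else if PySem.Str.startswith branch "codespace" then
      cats.modify "codespace" [] (· ++ [branch])
    else if PySem.Str.startswith branch "integrate/" then
      cats.modify "integrate" [] (· ++ [branch])
    else if PySem.Str.startswith branch "rebuild/" then
      cats.modify "rebuild" [] (· ++ [branch])
    else if PySem.Str.startswith branch "salvage/" then
      cats.modify "salvage" [] (· ++ [branch])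
    else
      cats.modify "other" [] (· ++ [branch])) =
    cats.modify (pvCatOf branch) [] (· ++ [branch]) := by
  unfold pvCatOf
  split_ifs <;> rfl

-- two incomparable prefixes cannot both start the same string
theorem pv_sw_excl (b p q : String) (h1 : ¬ p.toList <+: q.toList) (h2 : ¬ q.toList <+: p.toList)
    (hp : PySem.Str.startswith b p = true) : PySem.Str.startswith b q = false := by
  by_contra h
  rw [Bool.not_eq_false] at h
  rw [PySem.Str.startswith_eq, PySem.Chars.startswith_iff] at hp h
  rcases List.prefix_or_prefix_of_prefix hp h with hc | hc
  · exact h1 hc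
  · exact h2 hc

theorem pv_cat_codex (b : String) :
    (pvCatOf b == "codex") = (!(pvSpecial.contains b) && PySem.Str.startswith b "codex/") := by
  unfold pvCatOf pvSpecial
  by_cases hs : b ∈ (["main", "gh-pages", "reports-gh-pages"] : List String)
  · simp [hs]
  · by_cases hc : PySem.Str.startswith b "codex/" = true
    · simp_all
    · simp only [if_neg hs]
      split_ifs <;> simp_all

theorem pv_cat_copilot (b : String) :
    (pvCatOf b == "copilot") = (!(pvSpecial.contains b) && PySem.Str.startswith b "copilot/") := by
  unfold pvCatOf pvSpecial
  by_cases hs : b ∈ (["main", "gh-pages", "reports-gh-pages"] : List String)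
  · simp [hs]
  · by_cases hc : PySem.Str.startswith b "copilot/" = true
    · have e0 := pv_sw_excl b "copilot/" "codex/" (by decide) (by decide) hc

      simp_all
    · simp only [if_neg hs]
      split_ifs <;> simp_all

theorem pv_cat_feature (b : String) :
    (pvCatOf b == "feature") = (!(pvSpecial.contains b) && PySem.Str.startswith b "feature/") := by
  unfold pvCatOf pvSpecial
  by_cases hs : b ∈ (["main", "gh-pages", "reports-gh-pages"] : List String)
  · simp [hs]
  · by_cases hc : PySem.Str.startswith b "feature/" = true
    · have e0 := pv_sw_excl b "feature/" "codex/" (by decide) (by decide) hc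
      have e1 := pv_sw_excl b "feature/" "copilot/" (by decide) (by decide) hc
      simp_all
    · simp only [if_neg hs]
      split_ifs <;> simp_all

theorem pv_cat_archive (b : String) :
    (pvCatOf b == "archive") = (!(pvSpecial.contains b) && PySem.Str.startswith b "archive/") := by
  unfold pvCatOf pvSpecial
  by_cases hs : b ∈ (["main", "gh-pages", "reports-gh-pages"] : List String)
  · simp [hs]
  · by_cases hc : PySem.Str.startswith b "archive/" = true
    · have e0 := pv_sw_excl b "archive/" "codex/" (by decide) (by decide) hc
      have e1 := pv_sw_excl b "archive/" "copilot/" (by decide) (by decide) hc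
      have e2 := pv_sw_excl b "archive/" "feature/" (by decide) (by decide) hc
      simp_all
    · simp only [if_neg hs]
      split_ifs <;> simp_all

theorem pv_cat_codespace (b : String) :
    (pvCatOf b == "codespace") = (!(pvSpecial.contains b) && PySem.Str.startswith b "codespace") := by
  unfold pvCatOf pvSpecial
  by_cases hs : b ∈ (["main", "gh-pages", "reports-gh-pages"] : List String)
  · simp [hs]
  · by_cases hc : PySem.Str.startswith b "codespace" = true
    · have e0 := pv_sw_excl b "codespace" "codex/" (by decide) (by decide) hc
      have e1 := pv_sw_excl b "codespace" "copilot/" (by decide) (by decide) hc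
      have e2 := pv_sw_excl b "codespace" "feature/" (by decide) (by decide) hc
      have e3 := pv_sw_excl b "codespace" "archive/" (by decide) (by decide) hc
      simp_all
    · simp only [if_neg hs]
      split_ifs <;> simp_all

theorem pv_cat_integrate (b : String) :
    (pvCatOf b == "integrate") = (!(pvSpecial.contains b) && PySem.Str.startswith b "integrate/") := by
  unfold pvCatOf pvSpecial
  by_cases hs : b ∈ (["main", "gh-pages", "reports-gh-pages"] : List String)
  · simp [hs]
  · by_cases hc : PySem.Str.startswith b "integrate/" = true
    · have e0 := pv_sw_excl b "integrate/" "codex/" (by decide) (by decide) hc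
      have e1 := pv_sw_excl b "integrate/" "copilot/" (by decide) (by decide) hc
      have e2 := pv_sw_excl b "integrate/" "feature/" (by decide) (by decide) hc
      have e3 := pv_sw_excl b "integrate/" "archive/" (by decide) (by decide) hc
      have e4 := pv_sw_excl b "integrate/" "codespace" (by decide) (by decide) hc
      simp_all
    · simp only [if_neg hs]
      split_ifs <;> simp_all

theorem pv_cat_rebuild (b : String) :
    (pvCatOf b == "rebuild") = (!(pvSpecial.contains b) && PySem.Str.startswith b "rebuild/") := by
  unfold pvCatOf pvSpecial
  by_cases hs : b ∈ (["main", "gh-pages", "reports-gh-pages"] : List String)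
  · simp [hs]
  · by_cases hc : PySem.Str.startswith b "rebuild/" = true
    · have e0 := pv_sw_excl b "rebuild/" "codex/" (by decide) (by decide) hc
      have e1 := pv_sw_excl b "rebuild/" "copilot/" (by decide) (by decide) hc
      have e2 := pv_sw_excl b "rebuild/" "feature/" (by decide) (by decide) hc
      have e3 := pv_sw_excl b "rebuild/" "archive/" (by decide) (by decide) hc
      have e4 := pv_sw_excl b "rebuild/" "codespace" (by decide) (by decide) hc
      have e5 := pv_sw_excl b "rebuild/" "integrate/" (by decide) (by decide) hc
      simp_all
    · simp only [if_neg hs]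
      split_ifs <;> simp_all

theorem pv_cat_salvage (b : String) :
    (pvCatOf b == "salvage") = (!(pvSpecial.contains b) && PySem.Str.startswith b "salvage/") := by
  unfold pvCatOf pvSpecial
  by_cases hs : b ∈ (["main", "gh-pages", "reports-gh-pages"] : List String)
  · simp [hs]
  · by_cases hc : PySem.Str.startswith b "salvage/" = true
    · have e0 := pv_sw_excl b "salvage/" "codex/" (by decide) (by decide) hc
      have e1 := pv_sw_excl b "salvage/" "copilot/" (by decide) (by decide) hc
      have e2 := pv_sw_excl b "salvage/" "feature/" (by decide) (by decide) hc
      have e3 := pv_sw_excl b "salvage/" "archive/" (by decide) (by decide) hc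
      have e4 := pv_sw_excl b "salvage/" "codespace" (by decide) (by decide) hc
      have e5 := pv_sw_excl b "salvage/" "integrate/" (by decide) (by decide) hc
      have e6 := pv_sw_excl b "salvage/" "rebuild/" (by decide) (by decide) hc
      simp_all
    · simp only [if_neg hs]
      split_ifs <;> simp_all

theorem pv_cat_special (b : String) :
    (pvCatOf b == "special") = pvSpecial.contains b := by
  unfold pvCatOf pvSpecial
  by_cases hs : b ∈ (["main", "gh-pages", "reports-gh-pages"] : List String)
  · simp [hs]
  · simp only [if_neg hs]
    split_ifs <;> simp_all

theorem pv_cat_other (b : String) :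
    (pvCatOf b == "other") =
      (!(pvSpecial.contains b) && !(pvPrefixes.any (fun p => PySem.Str.startswith b p.2))) := by
  unfold pvCatOf pvSpecial pvPrefixes
  by_cases hs : b ∈ (["main", "gh-pages", "reports-gh-pages"] : List String)
  · simp [hs]
  · simp only [if_neg hs]
    split_ifs <;> simp_all

theorem pvCatOf_mem (b : String) :
    pvCatOf b ∈ (["codex", "copilot", "feature", "archive", "codespace",
      "integrate", "rebuild", "salvage", "special", "other"] : List String) := by
  unfold pvCatOf; split_ifs <;> simp

-- the fold keeps exactly the ten initial keys, in order
theorem pv_keys (branches : List String) :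
    (branches.foldl (fun cats b => cats.modify (pvCatOf b) [] (· ++ [b])) pvInit).keys
      = ["codex", "copilot", "feature", "archive", "codespace",
         "integrate", "rebuild", "salvage", "special", "other"] := by
  rw [PySem.Dict.keys_foldl_modify_key branches pvCatOf [] (fun _ x v => v ++ [x]) pvInit]
  rw [PySem.Set.update_eq_append_filter]
  have h : List.filter (fun y => !PySem.Set.contains pvInit.keys y)
      (PySem.Set.ofList (List.map pvCatOf branches)) = [] := by
    rw [List.filter_eq_nil_iff]
    intro a ha
    have hm : a ∈ List.map pvCatOf branches := (PySem.Set.mem_ofList _ _).1 ha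
    rcases List.mem_map.1 hm with ⟨b, _, rfl⟩
    have hmem := pvCatOf_mem b
    have hk : pvInit.keys = ["codex", "copilot", "feature", "archive", "codespace",
      "integrate", "rebuild", "salvage", "special", "other"] := by decide
    simp_all
  rw [h]
  decide

theorem pv_init_getD (c : String) : pvInit.getD c [] = [] := by
  have h : pvInit = PySem.Dict.mk
    [("codex", []), ("copilot", []), ("feature", []), ("archive", []), ("codespace", []),
     ("integrate", []), ("rebuild", []), ("salvage", []), ("special", []), ("other", [])] := by decide
  rw [h]
  simp only [PySem.Dict.getD, PySem.Dict.get?_mk_cons]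
  split_ifs <;> rfl

-- each bucket of the fold is a filter of the input by assigned category
theorem pv_getD (branches : List String) (c : String) :
    (branches.foldl (fun cats b => cats.modify (pvCatOf b) [] (· ++ [b])) pvInit).getD c []
      = branches.filter (fun b => pvCatOf b == c) := by
  rw [← List.foldl_map (f := fun b => (pvCatOf b, b))
        (g := fun (d : PySem.Dict String (List String)) p => d.modify p.1 [] (fun v => v ++ [p.2]))]
  rw [PySem.Dict.getD_foldl_modify_append]
  rw [pv_init_getD]
  simp [List.filter_map, Function.comp_def]

-- ===== VERDICT (by name: the statement is the Claim_ definition above) =====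
theorem categorize_branches_spec : Claim_equal_categorize_branches := by
  intro branches _
  unfold Spec_categorize_branches categorize_branches
  simp only [pv_step_eq]
  rw [show PySem.Dict.ofList
    [("codex", ([] : List String)), ("copilot", []), ("feature", []), ("archive", []), ("codespace", []),
     ("integrate", []), ("rebuild", []), ("salvage", []), ("special", []), ("other", [])] = pvInit from rfl]
  rw [PySem.Dict.items_eq_map_keys _ (by rw [pv_keys]; decide) []]
  rw [pv_keys]
  simp only [List.map_cons, List.map_nil, pv_getD]
  simp only [pv_cat_codex, pv_cat_copilot, pv_cat_feature, pv_cat_archive, pv_cat_codespace,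
    pv_cat_integrate, pv_cat_rebuild, pv_cat_salvage, pv_cat_special, pv_cat_other]
  unfold categorize_branches_alt pvPrefixes
  simp
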